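-- pv_equiv track=rewrite | github.com/rectangletangle/nlplib | src/nlplib/general/iterate.py | truncated
-- ===== SOURCE A (Python) =====
-- import collections
--
-- def truncated (iterable, amount) :
--     ''' This allows for iteration over all but the last couple of items in an iterable. '''
--
--     queue   = collections.deque()
--     append  = queue.append
--     popleft = queue.popleft
--
--     for item in iterable :
--         append(item)
--
--         if len(queue) > amount :
--             yield popleft()
-- ===== SOURCE B (Python) =====
-- def truncated(iterable, amount):
--     ''' This allows for iteration over all but the last couple of items in an iterable. '''
--     items = list(iterable)
--     count = max(0, min(len(items), len(items) - amount))
--     yield from items[:count]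
-- ===== Notes on version B (the rewrite author's own statement) =====
-- stated objective: simpler
-- what changed: B materializes the iterable once and yields a single clamped prefix slice items[:len(items)-amount], replacing A's streaming bounded deque that appends each item and pops/yields from the front whenever the buffer exceeds 'amount'.
import Mathlib
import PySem

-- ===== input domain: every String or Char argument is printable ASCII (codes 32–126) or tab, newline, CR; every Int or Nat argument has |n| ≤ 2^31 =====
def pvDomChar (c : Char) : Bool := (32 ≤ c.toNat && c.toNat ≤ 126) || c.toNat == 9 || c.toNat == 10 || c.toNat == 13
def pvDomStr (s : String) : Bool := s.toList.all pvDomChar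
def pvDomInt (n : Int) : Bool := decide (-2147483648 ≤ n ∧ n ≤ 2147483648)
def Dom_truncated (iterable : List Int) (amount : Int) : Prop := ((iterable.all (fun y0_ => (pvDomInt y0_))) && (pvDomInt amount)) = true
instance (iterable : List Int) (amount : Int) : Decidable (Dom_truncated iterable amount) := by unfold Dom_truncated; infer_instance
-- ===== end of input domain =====

-- B replaces A's streaming size-`amount` deque buffer by materializing the list once and
-- yielding one clamped prefix slice (objective: simpler; same asymptotic cost).

-- ===== PORT A =====
-- loop body of A: append item to the queue; if len(queue) > amount, pop from the left and yield it
def truncStep (amount : Int) (st : List Int × List Int) (item : Int) : List Int × List Int :=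
  let q := st.1 ++ [item]
  if amount < (q.length : Int) then (q.tail, st.2 ++ [q.headI]) else (q, st.2)

def truncated (iterable : List Int) (amount : Int) : List Int :=
  (iterable.foldl (truncStep amount) ([], [])).2

-- ===== PORT B =====
def truncated_alt (iterable : List Int) (amount : Int) : List Int :=
  let items := iterable
  let count := max 0 (min (items.length : Int) ((items.length : Int) - amount))
  PySem.List.slice items none (some count)

-- ===== PRECONDITION & SPEC =====
def Spec_truncated (iterable : List Int) (amount : Int) (out : List Int) : Prop := out = truncated_alt iterable amount
instance (iterable : List Int) (amount : Int) (out : List Int) : Decidable (Spec_truncated iterable amount out) := by unfold Spec_truncated; infer_instance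

-- ===== CLAIM (what is proved, stated in full; the proofs are below) =====
def Claim_equal_truncated : Prop := ∀ (iterable : List Int) (amount : Int), Dom_truncated iterable amount → Spec_truncated iterable amount (truncated iterable amount)

-- ===== LEMMAS AND PROOFS =====

-- Loop invariant for A's deque loop: starting from a queue of length ≤ amount.toNat, the fold
-- ends with the last amount.toNat items in the queue and yields everything before them.
lemma trunc_loop (amount : Int) (l : List Int) :
    ∀ q o : List Int, q.length ≤ amount.toNat →
      l.foldl (truncStep amount) (q, o)
      = ((q ++ l).drop ((q.length + l.length) - amount.toNat),
         o ++ (q ++ l).take ((q.length + l.length) - amount.toNat)) := by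
  induction l with
  | nil =>
    intro q o h
    simp [Nat.sub_eq_zero_of_le h]
  | cons x t ih =>
    intro q o h
    simp only [List.foldl_cons]
    by_cases hc : amount < ((q ++ [x]).length : Int)
    · -- the queue overflows: pop the head and yield it; here q.length = amount.toNat
      have hq_eq : q.length = amount.toNat := by
        simp only [List.length_append, List.length_cons, List.length_nil] at hc
        omega
      cases hq : q ++ [x] with
      | nil => simp at hq
      | cons y ys =>
        have hys : ys.length = amount.toNat := by
          have := congrArg List.length hq
          simp at this; omega
        have hc' : amount < ((y :: ys).length : Int) := hq ▸ hc
        have hstep : truncStep amount (q, o) x = (ys, o ++ [y]) := by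
          show (if amount < ((q ++ [x]).length : Int)
                then ((q ++ [x]).tail, o ++ [(q ++ [x]).headI])
                else (q ++ [x], o)) = (ys, o ++ [y])
          rw [hq, if_pos hc']
          simp
        rw [hstep, ih ys (o ++ [y]) (le_of_eq hys)]
        have hcons : q ++ x :: t = y :: (ys ++ t) := by
          have : (q ++ [x]) ++ t = y :: ys ++ t := by rw [hq]
          simpa using this
        rw [hcons]
        simp only [Prod.mk.injEq]
        refine ⟨?_, ?_⟩
        · simp only [List.length_cons]
          have h1 : q.length + (t.length + 1) - amount.toNat = (ys.length + t.length - amount.toNat) + 1 := by omega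
          rw [h1, List.drop_succ_cons]
        · simp only [List.length_cons]
          have h1 : q.length + (t.length + 1) - amount.toNat = (ys.length + t.length - amount.toNat) + 1 := by omega
          rw [h1, List.take_succ_cons]
          simp
    · -- the queue still has room: just append
      have hstep : truncStep amount (q, o) x = (q ++ [x], o) := by
        show (if amount < ((q ++ [x]).length : Int)
              then ((q ++ [x]).tail, o ++ [(q ++ [x]).headI])
              else (q ++ [x], o)) = (q ++ [x], o)
        rw [if_neg hc]
      have hlen : (q ++ [x]).length ≤ amount.toNat := by
        simp only [List.length_append, List.length_cons, List.length_nil] at hc ⊢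
        omega
      rw [hstep, ih (q ++ [x]) o hlen]
      have hn : (q ++ [x]).length + t.length - amount.toNat
          = q.length + (x :: t).length - amount.toNat := by
        simp only [List.length_append, List.length_cons, List.length_nil]
        omega
      rw [hn, List.append_assoc]
      simp only [List.singleton_append]

-- A computes the clamped prefix.
lemma truncated_eq_take (iterable : List Int) (amount : Int) :
    truncated iterable amount = iterable.take (iterable.length - amount.toNat) := by
  unfold truncated
  rw [trunc_loop amount iterable [] [] (by simp)]
  simp

-- B's clamped slice is the same clamped prefix.
lemma truncated_alt_eq_take (iterable : List Int) (amount : Int) :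
    truncated_alt iterable amount = iterable.take (iterable.length - amount.toNat) := by
  show PySem.List.slice iterable none
      (some (max 0 (min (iterable.length : Int) ((iterable.length : Int) - amount))))
    = iterable.take (iterable.length - amount.toNat)
  rw [PySem.List.slice_to]
  · congr 1
    omega
  · exact le_max_left _ _

-- ===== VERDICT (by name: the statement is the Claim_ definition above) =====
theorem truncated_spec : Claim_equal_truncated := by
  intro iterable amount _
  unfold Spec_truncated
  rw [truncated_eq_take, truncated_alt_eq_take]
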